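-- pv_equiv track=rewrite | github.com/pypi-data/pypi-mirror-396 | packages/circuitydatabase/circuitydatabase-17.tar.gz/circuitydatabase-17/src/circuitydatabase/circuity.py | add_loop_name_to_ends_of_columns_in_matrix
-- ===== SOURCE A (Python) =====
-- def add_loop_name_to_ends_of_columns_in_matrix(column_matrix):
--     # Add the next column name to the end of each column
--     looped_column_matrix = column_matrix.copy()
--     for current_position, column in enumerate(looped_column_matrix):
--         next_position = current_position + 1
--         if next_position >= len(column_matrix):
--             next_column_name = column_matrix[0][0]
--             column.append(next_column_name)
--         else:
--             next_column_name = column_matrix[current_position + 1][0]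
--             column.append(next_column_name)
--     return looped_column_matrix
-- ===== SOURCE B (Python) =====
-- def add_loop_name_to_ends_of_columns_in_matrix(column_matrix):
--     # Recursive structural decomposition over the list of columns: remember
--     # the first column's name once, then walk adjacent pairs recursively,
--     # appending each column's successor's head; the single-column base case
--     # performs the wraparound by appending the remembered first name.
--     result = column_matrix.copy()
--     if result:
--         _append_successor_names(result, result[0][0])
--     return result
--
--
-- def _append_successor_names(cols, first_name):
--     if len(cols) == 1:
--         cols[0].append(first_name)
--     else:
--         cols[0].append(cols[1][0])
--         _append_successor_names(cols[1:], first_name)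
-- ===== Notes on version B (the rewrite author's own statement) =====
-- stated objective: alternative
-- what changed: B replaces A's indexed single pass with wraparound if/else by a structural recursion over the list of columns: the first column's name is captured once, each recursive step appends the successor column's head to the current head column, and the single-column base case performs the wraparound with the remembered first name.
-- outside the precondition, e.g. on add_loop_name_to_ends_of_columns_in_matrix([[], ['b']]): A returns [['b'], ['b', 'b']], B raises IndexError
import Mathlib
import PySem

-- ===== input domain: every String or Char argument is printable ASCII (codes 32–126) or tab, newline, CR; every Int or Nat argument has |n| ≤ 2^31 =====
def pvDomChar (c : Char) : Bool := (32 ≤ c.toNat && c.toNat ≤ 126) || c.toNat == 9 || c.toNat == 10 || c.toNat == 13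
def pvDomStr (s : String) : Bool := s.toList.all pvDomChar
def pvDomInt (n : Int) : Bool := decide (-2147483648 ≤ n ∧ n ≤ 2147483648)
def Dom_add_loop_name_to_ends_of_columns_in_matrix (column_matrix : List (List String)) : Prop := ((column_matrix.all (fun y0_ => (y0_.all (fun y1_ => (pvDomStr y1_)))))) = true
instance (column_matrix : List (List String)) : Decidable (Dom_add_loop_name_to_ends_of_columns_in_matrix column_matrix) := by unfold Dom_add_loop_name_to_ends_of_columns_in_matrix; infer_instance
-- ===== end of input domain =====

-- B replaces A's indexed wraparound loop by a structural recursion over the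
-- column list (adjacent-pair walk with the first name remembered for the base
-- case); same cost, different decomposition.  Both programs mutate the shared
-- inner lists in place; the equivalence proved here is about the return value.


-- ===== PORT A =====
-- Python mutates the inner lists shared (via the shallow copy) between
-- looped_column_matrix and column_matrix, so both reads and writes go through
-- one evolving state `m`.  col[0] is modelled by getD 0 ""; under Pre_ every
-- column read is nonempty, so this is exact there (outside Pre_ Python raises
-- IndexError).
def pvLoopA (n : Nat) (m : List (List String)) (i : Nat) : List (List String) :=
  if _h : i < n then
    let name := if i + 1 ≥ n then (m.getD 0 []).getD 0 "" else (m.getD (i + 1) []).getD 0 ""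
    pvLoopA n (m.set i (m.getD i [] ++ [name])) (i + 1)
  else m
termination_by n - i

def add_loop_name_to_ends_of_columns_in_matrix (column_matrix : List (List String)) : List (List String) :=
  pvLoopA column_matrix.length column_matrix 0

-- ===== PORT B =====
-- Port of Source B's recursive helper `_append_successor_names` (the in-place
-- appends become a returned list; the inner lists are the same values).
def pvAppendSucc (firstName : String) : List (List String) → List (List String)
  | [] => []
  | [c] => [c ++ [firstName]]
  | c :: d :: rest => (c ++ [d.getD 0 ""]) :: pvAppendSucc firstName (d :: rest)

def add_loop_name_to_ends_of_columns_in_matrix_alt (column_matrix : List (List String)) : List (List String) :=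
  match column_matrix with
  | [] => []
  | c :: _ => pvAppendSucc (c.getD 0 "") column_matrix

-- ===== PRECONDITION & SPEC =====
-- Pre_ excludes matrices containing an empty column: there Python A raises
-- IndexError, except when only the FIRST column is empty (and there are ≥ 2
-- columns), where A returns a value produced by reading its own in-place
-- mutation of column 0; B naturally raises IndexError on all such inputs.
def Pre_add_loop_name_to_ends_of_columns_in_matrix (column_matrix : List (List String)) : Prop :=
  ∀ c ∈ column_matrix, c ≠ ([] : List String)
instance (column_matrix : List (List String)) : Decidable (Pre_add_loop_name_to_ends_of_columns_in_matrix column_matrix) := by unfold Pre_add_loop_name_to_ends_of_columns_in_matrix; infer_instance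
def pvWitness_add_loop_name_to_ends_of_columns_in_matrix : List (List String) := [["a"], ["b", "c"]]

def Spec_add_loop_name_to_ends_of_columns_in_matrix (column_matrix : List (List String)) (out : List (List String)) : Prop := out = add_loop_name_to_ends_of_columns_in_matrix_alt column_matrix
instance (column_matrix : List (List String)) (out : List (List String)) : Decidable (Spec_add_loop_name_to_ends_of_columns_in_matrix column_matrix out) := by unfold Spec_add_loop_name_to_ends_of_columns_in_matrix; infer_instance

-- ===== CLAIM (what is proved, stated in full; the proofs are below) =====
def Claim_equal_add_loop_name_to_ends_of_columns_in_matrix : Prop := ∀ (column_matrix : List (List String)), Dom_add_loop_name_to_ends_of_columns_in_matrix column_matrix → Pre_add_loop_name_to_ends_of_columns_in_matrix column_matrix → Spec_add_loop_name_to_ends_of_columns_in_matrix column_matrix (add_loop_name_to_ends_of_columns_in_matrix column_matrix)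

-- ===== LEMMAS AND PROOFS =====

-- Invariant: if every column of the state `m` is nonempty and the heads of `m`
-- are `names`, then the loop from position i appends to each remaining column j
-- the name of column (j+1) mod n, read off `names`.
theorem pvLoopA_eq (names : List String) :
    ∀ (k i : Nat) (m : List (List String)), names.length - i ≤ k →
      m.length = names.length →
      (∀ c ∈ m, c ≠ ([] : List String)) →
      (∀ j : Nat, (m.getD j []).getD 0 "" = names.getD j "") →
      pvLoopA names.length m i =
        m.take i ++ ((List.range names.length).drop i).map
          (fun j => m.getD j [] ++ [if j + 1 ≥ names.length then names.getD 0 "" else names.getD (j + 1) ""]) := by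
  intro k
  induction k with
  | zero =>
    intro i m hk hlen _ _
    have hge : names.length ≤ i := by omega
    have h1 : (List.range names.length).drop i = [] :=
      List.drop_eq_nil_of_le (by simpa using hge)
    rw [pvLoopA, dif_neg (by omega), h1, List.map_nil, List.append_nil,
      List.take_of_length_le (by omega)]
  | succ k ih =>
    intro i m hk hlen hne hheads
    by_cases hi : i < names.length
    · rw [pvLoopA]
      simp only [hi, dif_pos]
      have hname : (if i + 1 ≥ names.length then (m.getD 0 []).getD 0 ""
          else (m.getD (i + 1) []).getD 0 "")
          = (if i + 1 ≥ names.length then names.getD 0 "" else names.getD (i + 1) "") := by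
        by_cases h : i + 1 ≥ names.length
        · rw [if_pos h, if_pos h]; exact hheads 0
        · rw [if_neg h, if_neg h]; exact hheads (i + 1)
      rw [hname]
      set nm := (if i + 1 ≥ names.length then names.getD 0 "" else names.getD (i + 1) "") with hnm
      set m' := m.set i (m.getD i [] ++ [nm]) with hm'
      have hlen' : m'.length = names.length := by simp [hm', hlen]
      have hmem' : ∀ c ∈ m', c ≠ ([] : List String) := by
        intro c hc
        rcases List.mem_or_eq_of_mem_set hc with h | h
        · exact hne c h
        · subst h; simp
      have hgetD' : ∀ j : Nat, m'.getD j [] = if j = i then m.getD i [] ++ [nm] else m.getD j [] := by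
        intro j
        by_cases hj : j = i
        · rw [if_pos hj, hj]
          have hlt : i < m.length := by omega
          simp [hm', List.getD, hlt]
        · rw [if_neg hj]
          simp [hm', List.getD, List.getElem?_set_ne (by omega : i ≠ j)]
      have hheads' : ∀ j : Nat, (m'.getD j []).getD 0 "" = names.getD j "" := by
        intro j
        rw [hgetD']
        by_cases hj : j = i
        · rw [if_pos hj, hj]
          have hjm : i < m.length := by omega
          have hni : m.getD i [] ≠ [] := by
            rw [List.getD_eq_getElem m [] hjm]
            exact hne _ (List.getElem_mem hjm)
          rw [← hheads i]
          cases h : m.getD i [] with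
          | nil => exact absurd h hni
          | cons a l => simp [List.getD]
        · rw [if_neg hj]
          exact hheads j
      have := ih (i + 1) m' (by omega) hlen' hmem' hheads'
      rw [this]
      have hdrop : (List.range names.length).drop i = i :: (List.range names.length).drop (i + 1) := by
        rw [List.drop_eq_getElem_cons (by simpa using hi), List.getElem_range]
      rw [hdrop]
      simp only [List.map_cons]
      have htake : m'.take (i + 1) = m.take i ++ [m.getD i [] ++ [nm]] := by
        have hilen : i < m.length := by omega
        rw [hm', List.set_eq_take_append_cons_drop, if_pos hilen]
        rw [List.take_append, List.take_take, Nat.min_eq_right (by omega),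
          List.length_take, Nat.min_eq_left (by omega)]
        have h2 : i + 1 - i = 1 := by omega
        rw [h2]
        simp
      rw [htake]
      have hmap : ((List.range names.length).drop (i + 1)).map
            (fun j => m'.getD j [] ++ [if j + 1 ≥ names.length then names.getD 0 "" else names.getD (j + 1) ""])
          = ((List.range names.length).drop (i + 1)).map
            (fun j => m.getD j [] ++ [if j + 1 ≥ names.length then names.getD 0 "" else names.getD (j + 1) ""]) := by
        apply List.map_congr_left
        intro j hj
        have hji : j ≠ i := by
          obtain ⟨k2, hk2, hjk⟩ := List.mem_drop_iff_getElem.mp hj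
          simp only [List.getElem_range] at hjk
          omega
        rw [hgetD', if_neg hji]
      rw [hmap, hnm]
      simp
    · have h1 : (List.range names.length).drop i = [] :=
        List.drop_eq_nil_of_le (by simpa using Nat.not_lt.mp hi)
      rw [pvLoopA, dif_neg hi, h1, List.map_nil, List.append_nil,
        List.take_of_length_le (by omega)]

-- B's recursion computes the same index formula.
theorem pvAppendSucc_eq (f : String) :
    ∀ (l : List (List String)), l ≠ [] →
      pvAppendSucc f l = (List.range l.length).map
        (fun j => l.getD j [] ++ [if j + 1 ≥ l.length then f else (l.getD (j + 1) []).getD 0 ""]) := by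
  intro l
  induction l with
  | nil => intro h; exact absurd rfl h
  | cons c rest ih =>
    intro _
    cases rest with
    | nil =>
      simp [pvAppendSucc, List.range_succ, List.getD]
    | cons d rest' =>
      rw [pvAppendSucc, ih (by simp)]
      have hlen : (c :: d :: rest').length = (d :: rest').length + 1 := by simp
      rw [hlen, List.range_succ_eq_map]
      simp only [List.map_cons, List.map_map]
      congr 1
      apply List.map_congr_left
      intro j _
      simp only [Function.comp_apply, Nat.succ_eq_add_one]
      have h1 : (c :: d :: rest').getD (j + 1) [] = (d :: rest').getD j [] := by
        simp [List.getD]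
      have h2 : (c :: d :: rest').getD (j + 1 + 1) [] = (d :: rest').getD (j + 1) [] := by
        simp [List.getD]
      have hiff : (j + 1 + 1 ≥ (d :: rest').length + 1) ↔ (j + 1 ≥ (d :: rest').length) := by
        omega
      rw [h1, h2, if_congr hiff rfl rfl]

-- ===== VERDICT (by name: the statement is the Claim_ definition above) =====
theorem add_loop_name_to_ends_of_columns_in_matrix_spec : Claim_equal_add_loop_name_to_ends_of_columns_in_matrix := by
  intro cm _hdom hpre
  unfold Spec_add_loop_name_to_ends_of_columns_in_matrix add_loop_name_to_ends_of_columns_in_matrix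
  set names := cm.map (fun col => col.getD 0 "") with hnames
  have hlen : cm.length = names.length := by simp [hnames]
  have hheads : ∀ j : Nat, (cm.getD j []).getD 0 "" = names.getD j "" := by
    intro j
    by_cases hj : j < cm.length
    · simp [hnames, List.getD, hj]
    · rw [List.getD_eq_default cm [] (by omega), List.getD_eq_default names "" (by simp [hnames]; omega)]
      rfl
  rw [hlen, pvLoopA_eq names names.length 0 cm (by omega) hlen hpre hheads]
  simp only [List.take_zero, List.drop_zero, List.nil_append]
  cases cm with
  | nil => simp [add_loop_name_to_ends_of_columns_in_matrix_alt, hnames]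
  | cons c rest =>
    have halt : add_loop_name_to_ends_of_columns_in_matrix_alt (c :: rest)
        = pvAppendSucc (c.getD 0 "") (c :: rest) := rfl
    rw [halt, pvAppendSucc_eq (c.getD 0 "") (c :: rest) (by simp), hlen]
    apply List.map_congr_left
    intro j hj
    have hone : (if j + 1 ≥ names.length then names.getD 0 "" else names.getD (j + 1) "")
        = (if j + 1 ≥ names.length then c.getD 0 "" else ((c :: rest).getD (j + 1) []).getD 0 "") := by
      by_cases h : j + 1 ≥ names.length
      · rw [if_pos h, if_pos h, ← hheads 0]
        simp [List.getD]
      · rw [if_neg h, if_neg h]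
        exact (hheads (j + 1)).symm
    rw [hone]
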